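-- pv_equiv track=rewrite | github.com/njharman/rpg | treasure.py | reduce_groups
-- ===== SOURCE A (Python) =====
-- def reduce_groups(things):
--     """Combine (count, value, thing)."""
--     things = sorted(things, key=lambda x: (x[1], x[2]))
--     truecount = 0
--     for i, stuff in enumerate(things):
--         count, value, thing = stuff
--         truecount += count
--         try:
--             _, nvalue, nthing = things[i + 1]
--         except IndexError:
--             nvalue = nthing = None
--         if value == nvalue and thing == nthing:
--             continue
--         else:
--             yield truecount, value, thing
--             truecount = 0
-- ===== SOURCE B (Python) =====
-- def reduce_groups(things):
--     """Combine (count, value, thing)."""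
--     counts = {}
--     for count, value, thing in things:
--         key = (value, thing)
--         counts[key] = counts.get(key, 0) + count
--     for value, thing in sorted(counts):
--         yield counts[(value, thing)], value, thing
-- ===== Notes on version B (the rewrite author's own statement) =====
-- stated objective: simpler
-- what changed: Replaces the sort-then-adjacent-merge-with-index-lookahead by a one-pass dict aggregation keyed on (value, thing) followed by iterating the sorted keys.
import Mathlib
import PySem

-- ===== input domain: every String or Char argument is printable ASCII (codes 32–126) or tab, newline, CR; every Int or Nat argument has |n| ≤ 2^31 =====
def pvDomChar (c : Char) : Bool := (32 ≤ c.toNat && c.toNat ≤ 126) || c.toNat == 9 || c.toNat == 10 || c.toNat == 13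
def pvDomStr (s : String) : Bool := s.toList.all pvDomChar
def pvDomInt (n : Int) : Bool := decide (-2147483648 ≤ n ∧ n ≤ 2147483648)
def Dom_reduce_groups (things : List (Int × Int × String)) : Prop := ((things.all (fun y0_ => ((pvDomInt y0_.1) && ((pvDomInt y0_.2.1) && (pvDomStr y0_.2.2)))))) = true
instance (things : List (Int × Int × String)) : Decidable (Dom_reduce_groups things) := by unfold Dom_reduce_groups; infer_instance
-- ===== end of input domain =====

-- B replaces A's sort-then-adjacent-merge (index lookahead) by dict aggregation then sorted keys; objective: simpler.

-- ===== PORT A =====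
def reduce_groups (things : List (Int × Int × String)) : List (Int × Int × String) :=
  let s := PySem.List.sorted2 things (fun x => x.2.1) (fun x => x.2.2)
  -- for i, stuff in enumerate(things): … with things[i+1] lookahead (IndexError → nvalue = nthing = None,
  -- and then value == nvalue is False since value is an int and thing a str: the yield branch runs)
  let r := (PySem.List.enumerate s 0).foldl
    (fun (acc : List (Int × Int × String) × Int) p =>
      let truecount := acc.2 + p.2.1
      match PySem.List.pyGet? s (p.1 + 1) with
      | some nx =>
        if p.2.2.1 == nx.2.1 && p.2.2.2 == nx.2.2 then (acc.1, truecount)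
        else (acc.1 ++ [(truecount, p.2.2.1, p.2.2.2)], 0)
      | none => (acc.1 ++ [(truecount, p.2.2.1, p.2.2.2)], 0))
    ([], 0)
  r.1

-- ===== PORT B =====
def reduce_groups_alt (things : List (Int × Int × String)) : List (Int × Int × String) :=
  let counts := things.foldl
    (fun d x => d.insert (x.2.1, x.2.2) (d.getD (x.2.1, x.2.2) 0 + x.1))
    (PySem.Dict.empty : PySem.Dict (Int × String) Int)
  -- counts[(value, thing)] in Source B looks up a key that is present, hence exactly getD with any default
  (PySem.List.sorted2 counts.keys (fun k => k.1) (fun k => k.2)).map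
    (fun k => (counts.getD k 0, k.1, k.2))

-- ===== PRECONDITION & SPEC =====
def Spec_reduce_groups (things : List (Int × Int × String)) (out : List (Int × Int × String)) : Prop := out = reduce_groups_alt things
instance (things : List (Int × Int × String)) (out : List (Int × Int × String)) : Decidable (Spec_reduce_groups things out) := by unfold Spec_reduce_groups; infer_instance

-- ===== CLAIM (what is proved, stated in full; the proofs are below) =====
def Claim_equal_reduce_groups : Prop := ∀ (things : List (Int × Int × String)), Dom_reduce_groups things → Spec_reduce_groups things (reduce_groups things)

-- ===== LEMMAS AND PROOFS =====

-- the grouping key of an entry, and its lexicographic (Python tuple order) value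
def pkey (x : Int × Int × String) : Int × String := (x.2.1, x.2.2)
def klex (k : Int × String) : Lex (Int × String) := toLex (k.1, k.2)

lemma klex_inj {a b : Int × String} (h : klex a = klex b) : a = b := by
  cases a; cases b; simpa [klex, toLex_inj] using h

-- A's loop, as structural recursion on the sorted list with the running truecount
def mergeRun : List (Int × Int × String) → Int → List (Int × Int × String)
  | [], _ => []
  | [x], tc => [(tc + x.1, x.2.1, x.2.2)]
  | x :: y :: r, tc =>
    if pkey x = pkey y then mergeRun (y :: r) (tc + x.1)
    else (tc + x.1, x.2.1, x.2.2) :: mergeRun (y :: r) 0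

-- adjacent-deduplicated key list
def runs : List (Int × Int × String) → List (Int × String)
  | [] => []
  | [x] => [pkey x]
  | x :: y :: r => if pkey x = pkey y then runs (y :: r) else pkey x :: runs (y :: r)

def keySum (l : List (Int × Int × String)) (k : Int × String) : Int :=
  ((l.filter (fun x => decide (pkey x = k))).map (·.1)).sum

lemma keySum_nil (k : Int × String) : keySum [] k = 0 := rfl

lemma keySum_cons (x : Int × Int × String) (l : List (Int × Int × String)) (k : Int × String) :
    keySum (x :: l) k = (if pkey x = k then x.1 else 0) + keySum l k := by
  by_cases h : pkey x = k <;> simp [keySum, h]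

lemma keySum_perm {l l' : List (Int × Int × String)} (h : l.Perm l') (k : Int × String) :
    keySum l k = keySum l' k := by
  unfold keySum
  exact List.Perm.sum_eq (List.Perm.map _ (List.Perm.filter _ h))

lemma keySum_eq_zero_of_not_mem {l : List (Int × Int × String)} {k : Int × String}
    (h : k ∉ l.map pkey) : keySum l k = 0 := by
  induction l with
  | nil => rfl
  | cons x t ih =>
    simp only [List.map_cons, List.mem_cons, not_or] at h
    rw [keySum_cons, if_neg (fun hh => h.1 hh.symm), ih h.2, add_zero]

-- sorted2's comparator is exactly strict lexicographic comparison of the key tuple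
lemma comparator_eq {α : Type} (k1 : α → Int) (k2 : α → String) :
    (fun a b => decide (k1 a < k1 b) || (!decide (k1 b < k1 a) && decide (k2 a < k2 b)))
      = (fun a b => decide (toLex (k1 a, k2 a) < toLex (k1 b, k2 b))) := by
  funext a b
  rcases lt_trichotomy (k1 a) (k1 b) with h | h | h
  · have h2 : ¬ k1 b < k1 a := by omega
    simp [h, h2, Prod.Lex.lt_iff]
  · have h1 : ¬ k1 a < k1 b := by omega
    have h2 : ¬ k1 b < k1 a := by omega
    by_cases h3 : k2 a < k2 b <;> simp [h, h3, Prod.Lex.lt_iff]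
  · have h1 : ¬ k1 a < k1 b := by omega
    have hne : k1 a ≠ k1 b := by omega
    simp [(by omega : ¬ k1 a < k1 b), hne, Prod.Lex.lt_iff, h]

-- sorted2 with two keys is sorted with the lexicographic tuple key
lemma sorted2_eq_sorted_toLex {α : Type} (xs : List α) (k1 : α → Int) (k2 : α → String) :
    PySem.List.sorted2 xs k1 k2 = PySem.List.sorted xs (fun x => toLex (k1 x, k2 x)) := by
  show List.foldl (fun acc x => PySem.List.insertBy
      (fun a b => decide (k1 a < k1 b) || (!decide (k1 b < k1 a) && decide (k2 a < k2 b))) x acc) [] xs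
    = List.foldl (fun acc x => PySem.List.insertBy
      (fun a b => decide (toLex (k1 a, k2 a) < toLex (k1 b, k2 b))) x acc) [] xs
  rw [comparator_eq k1 k2]

-- ===== A-side: the indexed fold is mergeRun =====
lemma foldA (s : List (Int × Int × String)) :
    ∀ (t pre : List (Int × Int × String)), s = pre ++ t →
    ∀ (acc : List (Int × Int × String)) (tc : Int),
    (PySem.List.enumerate t (pre.length : Int)).foldl
      (fun (acc : List (Int × Int × String) × Int) p =>
        let truecount := acc.2 + p.2.1
        match PySem.List.pyGet? s (p.1 + 1) with
        | some nx =>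
          if p.2.2.1 == nx.2.1 && p.2.2.2 == nx.2.2 then (acc.1, truecount)
          else (acc.1 ++ [(truecount, p.2.2.1, p.2.2.2)], 0)
        | none => (acc.1 ++ [(truecount, p.2.2.1, p.2.2.2)], 0))
      (acc, tc)
    = (acc ++ mergeRun t tc, if t = [] then tc else 0) := by
  intro t
  induction t with
  | nil =>
    intro pre hp acc tc
    simp [PySem.List.enumerate, mergeRun]
  | cons x t' ih =>
    intro pre hp acc tc
    have hget : PySem.List.pyGet? s ((pre.length : Int) + 1) = t'[0]? := by
      subst hp
      rw [show ((pre.length : Int) + 1) = ((pre.length + 1 : Nat) : Int) by push_cast; ring]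
      rw [PySem.List.pyGet?_natCast]
      rw [List.getElem?_append_right (by omega)]
      simp
    rw [show PySem.List.enumerate (x :: t') (pre.length : Int)
        = ((pre.length : Int), x) :: PySem.List.enumerate t' ((pre.length : Int) + 1) from by
      simp [PySem.List.enumerate]]
    cases t' with
    | nil =>
      simp only [List.getElem?_nil] at hget
      simp [List.foldl_cons, hget, mergeRun]
    | cons y t'' =>
      simp only [List.getElem?_cons_zero] at hget
      simp only [List.foldl_cons, hget]
      have hlen : ((pre ++ [x]).length : Int) = (pre.length : Int) + 1 := by simp
      by_cases hk : pkey x = pkey y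
      · have hc : (x.2.1 == y.2.1 && x.2.2 == y.2.2) = true := by
          simp only [pkey, Prod.mk.injEq] at hk
          simp [hk.1, hk.2]
        simp only [hc, if_true]
        rw [← hlen, ih (pre ++ [x]) (by simp [hp]) acc (tc + x.1)]
        simp [mergeRun, hk]
      · have hc : (x.2.1 == y.2.1 && x.2.2 == y.2.2) = false := by
          have : ¬ (x.2.1 = y.2.1 ∧ x.2.2 = y.2.2) := by
            intro hc
            exact hk (by simp only [pkey, Prod.mk.injEq]; exact ⟨hc.1, hc.2⟩)
          by_cases h1 : x.2.1 = y.2.1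
          · simp [h1]; exact fun h2 => this ⟨h1, h2⟩
          · simp [h1]
        simp only [hc, Bool.false_eq_true, if_false]
        rw [← hlen, ih (pre ++ [x]) (by simp [hp]) (acc ++ [(tc + x.1, x.2.1, x.2.2)]) 0]
        simp [mergeRun, hk]

lemma reduce_groups_eq_mergeRun (things : List (Int × Int × String)) :
    reduce_groups things
      = mergeRun (PySem.List.sorted2 things (fun x => x.2.1) (fun x => x.2.2)) 0 := by
  unfold reduce_groups
  have h := foldA (PySem.List.sorted2 things (fun x => x.2.1) (fun x => x.2.2))
      (PySem.List.sorted2 things (fun x => x.2.1) (fun x => x.2.2)) [] rfl [] 0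
  rw [List.length_nil, Nat.cast_zero, List.nil_append] at h
  show ((PySem.List.enumerate (PySem.List.sorted2 things (fun x => x.2.1) (fun x => x.2.2)) 0).foldl
      (fun (acc : List (Int × Int × String) × Int) p =>
        let truecount := acc.2 + p.2.1
        match PySem.List.pyGet? (PySem.List.sorted2 things (fun x => x.2.1) (fun x => x.2.2)) (p.1 + 1) with
        | some nx =>
          if p.2.2.1 == nx.2.1 && p.2.2.2 == nx.2.2 then (acc.1, truecount)
          else (acc.1 ++ [(truecount, p.2.2.1, p.2.2.2)], 0)
        | none => (acc.1 ++ [(truecount, p.2.2.1, p.2.2.2)], 0))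
      ([], 0)).1
    = mergeRun (PySem.List.sorted2 things (fun x => x.2.1) (fun x => x.2.2)) 0
  rw [h]

-- ===== characterisation of runs and mergeRun on a sorted list =====
lemma mem_runs_iff : ∀ (s : List (Int × Int × String)) (k : Int × String),
    k ∈ runs s ↔ k ∈ s.map pkey
  | [], k => by simp [runs]
  | [x], k => by simp [runs]
  | x :: y :: r, k => by
    have ih := mem_runs_iff (y :: r) k
    by_cases h : pkey x = pkey y
    · simp only [runs, if_pos h, ih, List.map_cons, List.mem_cons]
      constructor
      · exact fun hm => Or.inr hm
      · rintro (rfl | hm)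
        · exact Or.inl h
        · exact hm
    · simp only [runs, if_neg h, List.mem_cons, ih, List.map_cons]

lemma runs_pairwise : ∀ (s : List (Int × Int × String)),
    s.Pairwise (fun a b => klex (pkey a) ≤ klex (pkey b)) →
    (runs s).Pairwise (fun a b => klex a < klex b)
  | [], _ => by simp [runs]
  | [x], _ => by simp [runs]
  | x :: y :: r, hs => by
    obtain ⟨hx, htail⟩ := List.pairwise_cons.1 hs
    by_cases h : pkey x = pkey y
    · simpa [runs, if_pos h] using runs_pairwise (y :: r) htail
    · rw [show runs (x :: y :: r) = pkey x :: runs (y :: r) from by rw [runs, if_neg h]]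
      refine List.Pairwise.cons ?_ (runs_pairwise (y :: r) htail)
      intro k hk
      obtain ⟨b, hb, rfl⟩ := List.mem_map.1 ((mem_runs_iff (y :: r) k).1 hk)
      have hxy : klex (pkey x) < klex (pkey y) :=
        lt_of_le_of_ne (hx y (List.mem_cons_self)) (fun he => h (klex_inj he))
      rcases List.mem_cons.1 hb with rfl | hbr
      · exact hxy
      · exact lt_of_lt_of_le hxy ((List.pairwise_cons.1 htail).1 b hbr)

lemma key_head_not_mem {x y : Int × Int × String} {r : List (Int × Int × String)}
    (hs : (x :: y :: r).Pairwise (fun a b => klex (pkey a) ≤ klex (pkey b)))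
    (h : pkey x ≠ pkey y) : pkey x ∉ (y :: r).map pkey := by
  obtain ⟨hx, htail⟩ := List.pairwise_cons.1 hs
  intro hm
  obtain ⟨b, hb, hbe⟩ := List.mem_map.1 hm
  rcases List.mem_cons.1 hb with rfl | hbr
  · exact h hbe.symm
  · have h2 : klex (pkey y) ≤ klex (pkey b) := (List.pairwise_cons.1 htail).1 b hbr
    have h3 : klex (pkey y) ≤ klex (pkey x) := hbe ▸ h2
    exact h (klex_inj (le_antisymm (hx y List.mem_cons_self) h3))

lemma mergeRun_go : ∀ (s : List (Int × Int × String)),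
    s.Pairwise (fun a b => klex (pkey a) ≤ klex (pkey b)) → ∀ (tc : Int),
    mergeRun s tc = (runs s).map
      (fun k => ((if s.head?.map pkey = some k then tc else 0) + keySum s k, k.1, k.2))
  | [], _, tc => by simp [mergeRun, runs]
  | [x], _, tc => by
    simp [mergeRun, runs, keySum_cons, keySum_nil, pkey]
  | x :: y :: r, hs, tc => by
    obtain ⟨hx, htail⟩ := List.pairwise_cons.1 hs
    by_cases h : pkey x = pkey y
    · rw [show mergeRun (x :: y :: r) tc = mergeRun (y :: r) (tc + x.1) from by
        rw [mergeRun, if_pos h]]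
      rw [mergeRun_go (y :: r) htail (tc + x.1)]
      rw [show runs (x :: y :: r) = runs (y :: r) from by rw [runs, if_pos h]]
      apply List.map_congr_left
      intro k hk
      simp only [List.head?_cons, Option.map_some]
      rw [keySum_cons x (y :: r) k]
      simp only [h]
      by_cases hkx : pkey y = k
      · simp [hkx]; ring
      · simp [hkx]
    · have hnot : pkey x ∉ (y :: r).map pkey := key_head_not_mem hs h
      rw [show mergeRun (x :: y :: r) tc = (tc + x.1, x.2.1, x.2.2) :: mergeRun (y :: r) 0 from by
        rw [mergeRun, if_neg h]]
      rw [mergeRun_go (y :: r) htail 0]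
      rw [show runs (x :: y :: r) = pkey x :: runs (y :: r) from by rw [runs, if_neg h]]
      rw [List.map_cons]
      congr 1
      · have hz : keySum (y :: r) (pkey x) = 0 := keySum_eq_zero_of_not_mem hnot
        simp only [List.head?_cons, Option.map_some]
        rw [keySum_cons x (y :: r) (pkey x), hz]
        simp [pkey]
      · apply List.map_congr_left
        intro k hk
        have hkx : k ≠ pkey x := by
          intro he
          exact hnot (he ▸ (mem_runs_iff (y :: r) k).1 hk)
        simp only [List.head?_cons, Option.map_some]
        rw [keySum_cons x (y :: r) k,
            if_neg (show ¬ pkey x = k from fun he => hkx he.symm),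
            if_neg (show ¬ some (pkey x) = some k from fun he => hkx (Option.some.inj he).symm)]
        simp

lemma mergeRun_eq (s : List (Int × Int × String))
    (hs : s.Pairwise (fun a b => klex (pkey a) ≤ klex (pkey b))) :
    mergeRun s 0 = (runs s).map (fun k => (keySum s k, k.1, k.2)) := by
  rw [mergeRun_go s hs 0]
  apply List.map_congr_left
  intro k _
  simp

-- ===== B-side =====
lemma getD_fold : ∀ (l : List (Int × Int × String)) (d : PySem.Dict (Int × String) Int)
    (k : Int × String),
    (l.foldl (fun d x => d.insert (x.2.1, x.2.2) (d.getD (x.2.1, x.2.2) 0 + x.1)) d).getD k 0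
      = d.getD k 0 + keySum l k
  | [], d, k => by simp [keySum_nil]
  | x :: t, d, k => by
    rw [List.foldl_cons, getD_fold t _ k, PySem.Dict.getD_insert, keySum_cons]
    have hk : pkey x = k ↔ k = (x.2.1, x.2.2) := by simp [pkey, eq_comm]
    by_cases h : k = (x.2.1, x.2.2)
    · rw [if_pos h, if_pos (hk.mpr h), h]
      ring
    · rw [if_neg h, if_neg (fun he => h (hk.mp he))]
      ring

lemma alt_eq (things : List (Int × Int × String)) :
    reduce_groups_alt things
      = (PySem.List.sorted2 (PySem.Set.ofList (things.map pkey)) (fun k => k.1) (fun k => k.2)).map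
          (fun k => (keySum things k, k.1, k.2)) := by
  simp only [reduce_groups_alt]
  have hkeys : (things.foldl
        (fun d x => d.insert (x.2.1, x.2.2) (d.getD (x.2.1, x.2.2) 0 + x.1))
        (PySem.Dict.empty : PySem.Dict (Int × String) Int)).keys
      = PySem.Set.ofList (things.map pkey) := by
    rw [PySem.Dict.keys_foldl_insert_key things (fun x => (x.2.1, x.2.2))
        (fun d x => d.getD (x.2.1, x.2.2) 0 + x.1) PySem.Dict.empty]
    rw [PySem.Dict.keys_empty, PySem.Set.update_nil_left]
    rfl
  rw [hkeys]
  congr 1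
  funext k
  rw [getD_fold, PySem.Dict.getD_empty, zero_add]

-- ===== VERDICT (by name: the statement is the Claim_ definition above) =====
theorem reduce_groups_spec : Claim_equal_reduce_groups := by
  intro things _
  unfold Spec_reduce_groups
  have hs2 := sorted2_eq_sorted_toLex things (fun x => x.2.1) (fun x => x.2.2)
  have hpair : (PySem.List.sorted2 things (fun x => x.2.1) (fun x => x.2.2)).Pairwise
      (fun a b => klex (pkey a) ≤ klex (pkey b)) := by
    rw [hs2]
    exact PySem.List.sorted_pairwise things (fun x => toLex (x.2.1, x.2.2))
  have hperm : (PySem.List.sorted2 things (fun x => x.2.1) (fun x => x.2.2)).Perm things :=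
    PySem.List.sorted2_perm things _ _ false
  have hnd : (runs (PySem.List.sorted2 things (fun x => x.2.1) (fun x => x.2.2))).Nodup :=
    List.Pairwise.imp (fun h he => absurd (congrArg klex he) (ne_of_lt h)) (runs_pairwise _ hpair)
  have hkeys_sorted : PySem.List.sorted2 (PySem.Set.ofList (things.map pkey))
        (fun k => k.1) (fun k => k.2)
      = runs (PySem.List.sorted2 things (fun x => x.2.1) (fun x => x.2.2)) := by
    rw [sorted2_eq_sorted_toLex]
    apply PySem.List.sorted_eq_of_perm_of_pairwise_lt
    · rw [List.perm_ext_iff_of_nodup hnd (PySem.Set.nodup_ofList _)]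
      intro k
      rw [mem_runs_iff, PySem.Set.mem_ofList]
      exact List.Perm.mem_iff (hperm.map pkey)
    · exact runs_pairwise _ hpair
  rw [reduce_groups_eq_mergeRun, mergeRun_eq _ hpair, alt_eq, hkeys_sorted]
  congr 1
  funext k
  rw [keySum_perm hperm]
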